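-- pv_equiv track=rewrite | github.com/eccho03/coding-test | codetree/프로그래머스/1/17681. ［1차］ 비밀지도/［1차］ 비밀지도.py | solution
-- ===== SOURCE A (Python) =====
-- def solution(n, arr1, arr2):
--     answer = []
--
--     map1 = []
--     map2 = []
--
--     new_arr = [[0]*n for _ in range(n)]
--
--     for i in range(n):
--         cur_line1 = format(arr1[i], f'0{n}b')
--         cur_line2 = format(arr2[i], f'0{n}b')
--         map1.append(list(map(int, cur_line1)))
--         map2.append(list(map(int, cur_line2)))
--
--     for i in range(n):
--         for j in range(n):
--             new_arr[i][j] = map1[i][j]|map2[i][j]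
--
--     for i in range(n):
--         tmp = ""
--         for j in range(n):
--             if new_arr[i][j]==1:
--                 tmp+='#'
--             else:
--                 tmp+=' '
--         answer.append(tmp)
--
--     return answer
-- ===== SOURCE B (Python) =====
-- def solution(n, arr1, arr2):
--     tr = str.maketrans('10', '# ')
--     return [format(arr1[i] | arr2[i], f'0{n}b').translate(tr) for i in range(n)]
-- ===== Notes on version B (the rewrite author's own statement) =====
-- stated objective: simpler
-- what changed: Per row, OR the two integers directly and translate the zero-padded binary string to '#'/' ' in one pass, instead of building two bit-list matrices, an OR matrix, and then rendering them in three separate loop nests.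
-- outside the precondition, e.g. on solution(1, [2], [0]): A returns ['#'], B returns ['# ']
import Mathlib
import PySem

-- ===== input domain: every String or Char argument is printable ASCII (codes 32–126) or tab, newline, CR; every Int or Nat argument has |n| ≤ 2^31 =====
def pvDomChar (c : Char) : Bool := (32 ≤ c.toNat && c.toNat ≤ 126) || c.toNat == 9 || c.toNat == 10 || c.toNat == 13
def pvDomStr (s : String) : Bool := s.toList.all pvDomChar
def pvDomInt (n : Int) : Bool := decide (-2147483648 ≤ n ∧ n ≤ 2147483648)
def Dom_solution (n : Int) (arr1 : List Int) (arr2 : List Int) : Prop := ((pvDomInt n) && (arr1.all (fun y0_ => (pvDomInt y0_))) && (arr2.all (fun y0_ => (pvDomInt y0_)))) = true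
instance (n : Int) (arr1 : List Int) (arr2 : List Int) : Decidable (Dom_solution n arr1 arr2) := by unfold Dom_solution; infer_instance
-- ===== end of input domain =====

-- B replaces A's three loop nests over bit-list matrices by one pass per row: OR the two
-- integers and translate the zero-padded binary string to '#'/' ' (same cost, simpler).


-- ===== PORT A =====
-- binary digits of x, most significant first ([] for 0)
def natBinChars (x : Nat) : List Char :=
  if _h : x = 0 then [] else natBinChars (x / 2) ++ [if x % 2 == 1 then '1' else '0']
decreasing_by exact Nat.div_lt_self (Nat.pos_of_ne_zero _h) (by omega)

-- format(x, f'0{n}b'): a negative x gives '-' then |x| zero-padded to width n - 1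
-- (in A that makes list(map(int, …)) raise ValueError on '-'; outside Pre_)
def binFmt (n : Int) (x : Int) : List Char :=
  let s := if x = 0 then ['0'] else natBinChars x.natAbs
  if x < 0 then '-' :: (List.replicate (n.toNat - 1 - s.length) '0' ++ s)
  else List.replicate (n.toNat - s.length) '0' ++ s

-- int(c) for a single digit character (exact on '0'..'9')
def charInt (c : Char) : Int := (c.toNat : Int) - 48

def solution (n : Int) (arr1 : List Int) (arr2 : List Int) : List String :=
  let map1 := (PySem.List.pyRange 0 n 1).map
    (fun i => (binFmt n (PySem.List.pyGetD arr1 i 0)).map charInt)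
  let map2 := (PySem.List.pyRange 0 n 1).map
    (fun i => (binFmt n (PySem.List.pyGetD arr2 i 0)).map charInt)
  let newArr := (PySem.List.pyRange 0 n 1).map
    (fun i => (PySem.List.pyRange 0 n 1).map
      (fun j => PySem.Int.bor (PySem.List.pyGetD (PySem.List.pyGetD map1 i []) j 0)
                              (PySem.List.pyGetD (PySem.List.pyGetD map2 i []) j 0)))
  (PySem.List.pyRange 0 n 1).map
    (fun i => String.ofList ((PySem.List.pyRange 0 n 1).map
      (fun j => if PySem.List.pyGetD (PySem.List.pyGetD newArr i []) j 0 == 1 then '#' else ' ')))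

-- ===== PORT B =====
-- str.translate with the table {'1': '#', '0': ' '}: other characters unchanged
def trChar (c : Char) : Char := if c = '1' then '#' else if c = '0' then ' ' else c

def solution_alt (n : Int) (arr1 : List Int) (arr2 : List Int) : List String :=
  (PySem.List.pyRange 0 n 1).map
    (fun i => String.ofList ((binFmt n (PySem.Int.bor (PySem.List.pyGetD arr1 i 0)
                                                      (PySem.List.pyGetD arr2 i 0))).map trChar))

-- ===== PRECONDITION & SPEC =====
-- Pre_ excludes inputs where A raises: a negative entry among the first n (ValueError on the
-- '-' sign) or fewer than n entries (IndexError); it also excludes entries ≥ 2^n, on which A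
-- still returns a value, but one that merely reflects A reading only the first n characters
-- (an arbitrary most-significant-bit prefix) of the over-wide binary string — a
-- defensible-corner artefact of its indexing, which B does not reproduce.
def Pre_solution (n : Int) (arr1 : List Int) (arr2 : List Int) : Prop :=
  n ≤ arr1.length ∧ n ≤ arr2.length ∧
  (∀ x ∈ arr1.take n.toNat, 0 ≤ x ∧ x < 2 ^ n.toNat) ∧
  (∀ x ∈ arr2.take n.toNat, 0 ≤ x ∧ x < 2 ^ n.toNat)
instance (n : Int) (arr1 : List Int) (arr2 : List Int) : Decidable (Pre_solution n arr1 arr2) := by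
  unfold Pre_solution; infer_instance

def pvWitness_solution : Int × List Int × List Int := (2, [1, 3], [2, 0])

def Spec_solution (n : Int) (arr1 : List Int) (arr2 : List Int) (out : List String) : Prop := out = solution_alt n arr1 arr2
instance (n : Int) (arr1 : List Int) (arr2 : List Int) (out : List String) : Decidable (Spec_solution n arr1 arr2 out) := by unfold Spec_solution; infer_instance

-- ===== CLAIM (what is proved, stated in full; the proofs are below) =====
def Claim_equal_solution : Prop := ∀ (n : Int) (arr1 : List Int) (arr2 : List Int), Dom_solution n arr1 arr2 → Pre_solution n arr1 arr2 → Spec_solution n arr1 arr2 (solution n arr1 arr2)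

-- ===== LEMMAS AND PROOFS =====
lemma natBinChars_zero : natBinChars 0 = [] := by rw [natBinChars]; rfl

lemma natBinChars_pos (x : Nat) (h : x ≠ 0) :
    natBinChars x = natBinChars (x / 2) ++ [if x % 2 == 1 then '1' else '0'] := by
  rw [natBinChars]; simp [h]

lemma natBinChars_length_le (m : Nat) : ∀ x : Nat, x < 2 ^ m → (natBinChars x).length ≤ m := by
  induction m with
  | zero => intro x hx; interval_cases x; simp [natBinChars_zero]
  | succ m ih =>
    intro x hx
    by_cases h0 : x = 0
    · simp [h0, natBinChars_zero]
    · rw [natBinChars_pos x h0]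
      have h2 : 2 ^ (m + 1) = 2 ^ m * 2 := pow_succ 2 m
      have := ih (x / 2) (by omega)
      simp; omega

-- the zero-padded digit list of x, read bit by bit from the most significant end
lemma padBin_eq (m : Nat) : ∀ x : Nat, x < 2 ^ m →
    List.replicate (m - (natBinChars x).length) '0' ++ natBinChars x
      = (List.range m).map (fun j => if x.testBit (m - 1 - j) then '1' else '0') := by
  induction m with
  | zero => intro x hx; interval_cases x; simp [natBinChars_zero]
  | succ m ih =>
    intro x hx
    have h2 : 2 ^ (m + 1) = 2 ^ m * 2 := pow_succ 2 m
    have hx2 : x / 2 < 2 ^ m := by omega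
    rw [List.range_succ, List.map_append]
    have hmap : (List.range m).map (fun j => if x.testBit (m + 1 - 1 - j) then '1' else '0')
        = (List.range m).map (fun j => if (x / 2).testBit (m - 1 - j) then '1' else '0') := by
      apply List.map_congr_left
      intro j hj
      have hj' : j < m := List.mem_range.mp hj
      rw [show m + 1 - 1 - j = (m - 1 - j) + 1 by omega, Nat.testBit_add_one]
    rw [hmap, ← ih (x / 2) hx2]
    by_cases h0 : x = 0
    · subst h0
      simp [natBinChars_zero, List.replicate_succ']
    · rw [natBinChars_pos x h0]
      have hlen := natBinChars_length_le m (x / 2) hx2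
      rw [show m + 1 - (natBinChars (x / 2) ++ [if x % 2 == 1 then '1' else '0']).length
            = m - (natBinChars (x / 2)).length by simp]
      rw [← List.append_assoc]
      congr 1
      simp only [List.map_cons, List.map_nil, show m + 1 - 1 - m = 0 by omega]
      by_cases hp : x % 2 = 1 <;> simp [hp, Nat.testBit_zero, Nat.mod_two_ne_one.mp]

lemma binFmt_eq (m x : Nat) (hm : 1 ≤ m) (hx : x < 2 ^ m) :
    binFmt (m : Int) (x : Int)
      = (List.range m).map (fun j => if x.testBit (m - 1 - j) then '1' else '0') := by
  unfold binFmt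
  by_cases h0 : x = 0
  · subst h0
    simp [Nat.zero_testBit]
    rw [show m = (m - 1) + 1 by omega, List.replicate_succ']
    simp
  · have hx0 : (x : Int) ≠ 0 := by exact_mod_cast h0
    have hneg : ¬((x : Int) < 0) := not_lt.mpr (Int.natCast_nonneg x)
    simp only [hx0, hneg, if_false, Int.natAbs_natCast, Int.toNat_natCast]
    rw [← padBin_eq m x hx]

-- one row: A's index-wise OR of the two digit matrices equals B's translated row string
lemma row_eq (m : Nat) (a b : Int) (hm : 1 ≤ m) (ha0 : 0 ≤ a) (ha : a < 2 ^ (m : Nat))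
    (hb0 : 0 ≤ b) (hb : b < 2 ^ (m : Nat)) :
    (PySem.List.pyRange 0 (m : Int) 1).map (fun j =>
        if PySem.Int.bor (PySem.List.pyGetD ((binFmt (m : Int) a).map charInt) j 0)
                         (PySem.List.pyGetD ((binFmt (m : Int) b).map charInt) j 0) == 1
        then '#' else ' ')
      = (binFmt (m : Int) (PySem.Int.bor a b)).map trChar := by
  have hA : a.toNat < 2 ^ m := by
    have : ((2 ^ m : Nat) : Int) = 2 ^ m := by push_cast; ring
    omega
  have hB : b.toNat < 2 ^ m := by
    have : ((2 ^ m : Nat) : Int) = 2 ^ m := by push_cast; ring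
    omega
  have ha' : a = ((a.toNat : Nat) : Int) := (Int.toNat_of_nonneg ha0).symm
  have hb' : b = ((b.toNat : Nat) : Int) := (Int.toNat_of_nonneg hb0).symm
  rw [ha', hb', PySem.Int.bor_natCast]
  rw [binFmt_eq m a.toNat hm hA, binFmt_eq m b.toNat hm hB,
      binFmt_eq m (a.toNat ||| b.toNat) hm (Nat.or_lt_two_pow hA hB)]
  rw [PySem.List.pyRange_zero_natCast, List.map_map, List.map_map, List.map_map, List.map_map]
  apply List.map_congr_left
  intro j hj
  have hj' : j < m := List.mem_range.mp hj
  simp only [Function.comp_apply, PySem.List.pyGetD_natCast, List.getD_eq_getElem?_getD,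
    List.getElem?_map, List.getElem?_range, hj']
  by_cases hp : a.toNat.testBit (m - 1 - j) <;> by_cases hq : b.toNat.testBit (m - 1 - j) <;>
    simp [hp, hq, Nat.testBit_or, charInt, trChar] <;> decide

lemma solution_eq_alt (n : Int) (arr1 : List Int) (arr2 : List Int)
    (h1 : n ≤ arr1.length) (h2 : n ≤ arr2.length)
    (h3 : ∀ x ∈ arr1.take n.toNat, 0 ≤ x ∧ x < 2 ^ n.toNat)
    (h4 : ∀ x ∈ arr2.take n.toNat, 0 ≤ x ∧ x < 2 ^ n.toNat) :
    solution n arr1 arr2 = solution_alt n arr1 arr2 := by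
  simp only [solution, solution_alt]
  apply List.map_congr_left
  intro i hi
  obtain ⟨hi0, hin⟩ := (PySem.List.mem_pyRange_one).mp hi
  have hm1 : 1 ≤ n.toNat := by omega
  have hmn : (n.toNat : Int) = n := Int.toNat_of_nonneg (by omega)
  have hga : PySem.List.pyGetD arr1 i 0 = arr1[i.toNat] :=
    PySem.List.pyGetD_eq_getElem arr1 0 hi0 (by omega)
  have hgb : PySem.List.pyGetD arr2 i 0 = arr2[i.toNat] :=
    PySem.List.pyGetD_eq_getElem arr2 0 hi0 (by omega)
  have hmem1 : arr1[i.toNat] ∈ arr1.take n.toNat := by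
    have h2 : i.toNat < (arr1.take n.toNat).length := by simp; omega
    rw [← List.getElem_take]; exact List.getElem_mem h2
  have hmem2 : arr2[i.toNat] ∈ arr2.take n.toNat := by
    have h2 : i.toNat < (arr2.take n.toNat).length := by simp; omega
    rw [← List.getElem_take]; exact List.getElem_mem h2
  obtain ⟨ha0, ha⟩ := h3 _ hmem1
  obtain ⟨hb0, hb⟩ := h4 _ hmem2
  simp only [PySem.List.pyGetD_map_pyRange_of_nonneg _ n i _ hi0 hin]
  congr 1
  have hrow := row_eq n.toNat (PySem.List.pyGetD arr1 i 0) (PySem.List.pyGetD arr2 i 0) hm1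
    (by rw [hga]; exact ha0) (by rw [hga]; exact ha)
    (by rw [hgb]; exact hb0) (by rw [hgb]; exact hb)
  rw [hmn] at hrow
  rw [← hrow]
  apply List.map_congr_left
  intro j hj
  obtain ⟨hj0, hjn⟩ := (PySem.List.mem_pyRange_one).mp hj
  rw [PySem.List.pyGetD_map_pyRange_of_nonneg _ n j _ hj0 hjn]

-- ===== VERDICT (by name: the statement is the Claim_ definition above) =====
theorem solution_spec : Claim_equal_solution := by
  intro n arr1 arr2 _hdom hpre
  obtain ⟨h1, h2, h3, h4⟩ := hpre
  unfold Spec_solution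
  exact solution_eq_alt n arr1 arr2 h1 h2 h3 h4
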